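-- pv_equiv track=rewrite | github.com/Christianm9000/MandelBrotNSC2026 | Workshop2/mandelbrot_dask_distributed.py | make_row_chunks
-- ===== SOURCE A (Python) =====
-- def make_row_chunks(N, n_chunks):
--     n_tasks = max(1, min(n_chunks, N))
--     base = N // n_tasks
--     rem = N % n_tasks
--
--     bounds = []
--     row = 0
--     for i in range(n_tasks):
--         size = base + (1 if i < rem else 0)
--         row_end = row + size
--         bounds.append((row, row_end))
--         row = row_end
--
--     return bounds
-- ===== SOURCE B (Python) =====
-- def make_row_chunks(N, n_chunks):
--     n_tasks = max(1, min(n_chunks, N))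
--     base = N // n_tasks
--     rem = N % n_tasks
--     return [(i * base + min(i, rem), (i + 1) * base + min(i + 1, rem))
--             for i in range(n_tasks)]
-- ===== Notes on version B (the rewrite author's own statement) =====
-- stated objective: simpler
-- what changed: Replaces the running row accumulator loop with a list comprehension computing each chunk's bounds in closed form from its index (i*base + min(i, rem)).
import Mathlib
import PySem

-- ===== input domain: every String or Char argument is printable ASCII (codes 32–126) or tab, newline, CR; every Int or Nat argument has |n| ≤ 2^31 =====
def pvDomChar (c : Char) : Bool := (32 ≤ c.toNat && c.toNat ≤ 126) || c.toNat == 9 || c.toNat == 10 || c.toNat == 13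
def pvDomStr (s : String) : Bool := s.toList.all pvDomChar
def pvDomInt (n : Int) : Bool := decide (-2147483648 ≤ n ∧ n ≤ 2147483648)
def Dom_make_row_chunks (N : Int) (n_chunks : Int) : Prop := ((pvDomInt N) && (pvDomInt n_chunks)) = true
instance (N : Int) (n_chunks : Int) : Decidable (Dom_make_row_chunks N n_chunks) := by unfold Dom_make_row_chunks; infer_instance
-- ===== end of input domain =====

-- B replaces A's running-accumulator loop with a per-index closed form (simpler; return value proved equal).

-- ===== PORT A =====
def make_row_chunks (N : Int) (n_chunks : Int) : List (Int × Int) :=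
  let n_tasks := max 1 (min n_chunks N)
  let base := PySem.Int.floordiv N n_tasks
  let rem := PySem.Int.mod N n_tasks
  let res := (PySem.List.pyRange 0 n_tasks).foldl
    (fun (st : List (Int × Int) × Int) i =>
      let size := base + (if i < rem then 1 else 0)
      let row_end := st.2 + size
      (st.1 ++ [(st.2, row_end)], row_end)) ([], 0)
  res.1

-- ===== PORT B =====
def make_row_chunks_alt (N : Int) (n_chunks : Int) : List (Int × Int) :=
  let n_tasks := max 1 (min n_chunks N)
  let base := PySem.Int.floordiv N n_tasks
  let rem := PySem.Int.mod N n_tasks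
  (PySem.List.pyRange 0 n_tasks).map
    (fun i => (i * base + min i rem, (i + 1) * base + min (i + 1) rem))

-- ===== PRECONDITION & SPEC =====
def Spec_make_row_chunks (N : Int) (n_chunks : Int) (out : List (Int × Int)) : Prop := out = make_row_chunks_alt N n_chunks
instance (N : Int) (n_chunks : Int) (out : List (Int × Int)) : Decidable (Spec_make_row_chunks N n_chunks out) := by unfold Spec_make_row_chunks; infer_instance

-- ===== CLAIM (what is proved, stated in full; the proofs are below) =====
def Claim_equal_make_row_chunks : Prop := ∀ (N : Int) (n_chunks : Int), Dom_make_row_chunks N n_chunks → Spec_make_row_chunks N n_chunks (make_row_chunks N n_chunks)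

-- ===== LEMMAS AND PROOFS =====

-- Loop invariant: after i iterations, A's accumulator state is (B's first i tuples, i*base + min i rem).
theorem pv_loop_eq (base rem : Int) (hrem : 0 ≤ rem) (n : Nat) :
    (PySem.List.pyRange 0 (n : Int)).foldl
      (fun (st : List (Int × Int) × Int) i =>
        (st.1 ++ [(st.2, st.2 + (base + (if i < rem then 1 else 0)))],
         st.2 + (base + (if i < rem then 1 else 0)))) ([], 0)
    = ((PySem.List.pyRange 0 (n : Int)).map
        (fun i => (i * base + min i rem, (i + 1) * base + min (i + 1) rem)),
       (n : Int) * base + min (n : Int) rem) := by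
  induction n with
  | zero => simp [PySem.List.pyRange]; omega
  | succ n ih =>
    rw [show ((n + 1 : Nat) : Int) = (n : Int) + 1 by push_cast; ring,
        PySem.List.pyRange_one_succ_right (by positivity)]
    rw [List.foldl_append, List.map_append, ih]
    simp only [List.foldl_cons, List.foldl_nil, List.map_cons, List.map_nil]
    have key : min ((n : Int)) rem + (if ((n : Int)) < rem then (1 : Int) else 0)
        = min ((n : Int) + 1) rem := by split_ifs <;> omega
    have e2 : (n : Int) * base + min ((n : Int)) rem + (base + if ((n : Int)) < rem then (1 : Int) else 0)
        = ((n : Int) + 1) * base + min ((n : Int) + 1) rem := by rw [← key]; ring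
    rw [e2]

theorem make_row_chunks_eq (N : Int) (n_chunks : Int) :
    make_row_chunks N n_chunks = make_row_chunks_alt N n_chunks := by
  unfold make_row_chunks make_row_chunks_alt
  have h1 : (0 : Int) < max 1 (min n_chunks N) := by positivity
  have hrem : 0 ≤ PySem.Int.mod N (max 1 (min n_chunks N)) := PySem.Int.mod_nonneg N h1
  obtain ⟨n, hn⟩ : ∃ n : Nat, max 1 (min n_chunks N) = (n : Int) :=
    ⟨(max 1 (min n_chunks N)).toNat, by omega⟩
  simp only [hn] at hrem ⊢
  exact congrArg Prod.fst (pv_loop_eq _ _ hrem n)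

-- ===== VERDICT (by name: the statement is the Claim_ definition above) =====
theorem make_row_chunks_spec : Claim_equal_make_row_chunks := by
  intro N c _
  exact make_row_chunks_eq N c
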